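-- pv_equiv track=rewrite | github.com/davidAlvarez24913/exercices_devsucodejam | exercise_13_2011_easy.py | exercise_13
-- ===== SOURCE A (Python) =====
-- def exercise_13(my_array):
--     negative = []
--     positive = []
--     for x in my_array:
--         if x <0 :
--             negative.append(x)
--         else:
--             positive.append(x)
--     result = negative + positive
--     return result
-- ===== SOURCE B (Python) =====
-- def exercise_13(my_array):
--     return sorted(my_array, key=lambda x: x >= 0)
-- ===== Notes on version B (the rewrite author's own statement) =====
-- stated objective: idiomatic
-- what changed: Replaces the explicit two-bucket partition loop and list concatenation with a single stable sort keyed on the sign predicate (x >= 0), which keeps negatives first and preserves relative order within each group.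
import Mathlib
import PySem

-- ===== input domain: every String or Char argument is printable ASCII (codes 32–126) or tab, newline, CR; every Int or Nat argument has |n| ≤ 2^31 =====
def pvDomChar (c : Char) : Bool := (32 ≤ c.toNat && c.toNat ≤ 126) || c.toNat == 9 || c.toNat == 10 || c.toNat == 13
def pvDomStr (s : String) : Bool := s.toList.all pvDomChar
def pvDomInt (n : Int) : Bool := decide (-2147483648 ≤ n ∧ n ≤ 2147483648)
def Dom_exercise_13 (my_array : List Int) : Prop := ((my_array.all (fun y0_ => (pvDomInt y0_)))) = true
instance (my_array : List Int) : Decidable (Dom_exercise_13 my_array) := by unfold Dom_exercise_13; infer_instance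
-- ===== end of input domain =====

-- B replaces A's explicit two-bucket partition loop with one stable sort keyed on the sign predicate (idiomatic; same result, not faster).


-- ===== PORT A =====
-- A: one pass appending each element to a 'negative' or 'positive' bucket, then concatenate.
def exercise_13 (my_array : List Int) : List Int :=
  let acc := my_array.foldl
    (fun (st : List Int × List Int) x =>
      if x < 0 then (st.1 ++ [x], st.2) else (st.1, st.2 ++ [x]))
    ([], [])
  acc.1 ++ acc.2

-- ===== PORT B =====
-- B: sorted(my_array, key=lambda x: x >= 0) — stable sort on a Bool key.
def exercise_13_alt (my_array : List Int) : List Int :=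
  PySem.List.sorted my_array (fun x => decide (0 ≤ x)) false

-- ===== PRECONDITION & SPEC =====
def Spec_exercise_13 (my_array : List Int) (out : List Int) : Prop := out = exercise_13_alt my_array
instance (my_array : List Int) (out : List Int) : Decidable (Spec_exercise_13 my_array out) := by unfold Spec_exercise_13; infer_instance

-- ===== CLAIM (what is proved, stated in full; the proofs are below) =====
def Claim_equal_exercise_13 : Prop := ∀ (my_array : List Int), Dom_exercise_13 my_array → Spec_exercise_13 my_array (exercise_13 my_array)

-- ===== LEMMAS AND PROOFS =====

-- Inserting an element whose key is false into (falses ++ trues) puts it right after the falses.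
lemma insertBy_false {κ : Type} [LinearOrder κ] (key : Int → κ) (x : Int)
    (N P : List Int) (hN : ∀ y ∈ N, key y = key x) (hP : ∀ y ∈ P, key x < key y) :
    PySem.List.insertBy (fun a b => decide (key a < key b)) x (N ++ P) = N ++ x :: P := by
  induction N with
  | nil =>
    cases P with
    | nil => simp [PySem.List.insertBy]
    | cons y ys =>
      have := hP y (by simp)
      simp [PySem.List.insertBy, this]
  | cons y N' ih =>
    have hy : key y = key x := hN y (by simp)
    simp [PySem.List.insertBy, hy, ih (fun z hz => hN z (by simp [hz]))]

-- Inserting an element not strictly before anything appends it at the end.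
lemma insertBy_true {κ : Type} [LinearOrder κ] (key : Int → κ) (x : Int)
    (L : List Int) (hL : ∀ y ∈ L, ¬ key x < key y) :
    PySem.List.insertBy (fun a b => decide (key a < key b)) x L = L ++ [x] := by
  induction L with
  | nil => simp [PySem.List.insertBy]
  | cons y ys ih =>
    have := hL y (by simp)
    simp [PySem.List.insertBy, this, ih (fun z hz => hL z (by simp [hz]))]

-- Invariant of the insertion-sort fold with the Bool key (0 ≤ x): false keys stay in front, in order.
lemma foldl_insertBy_partition (xs N P : List Int)
    (hN : ∀ y ∈ N, y < 0) (hP : ∀ y ∈ P, 0 ≤ y) :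
    xs.foldl (fun acc x => PySem.List.insertBy
        (fun a b => decide ((decide (0 ≤ a) : Bool) < (decide (0 ≤ b) : Bool))) x acc) (N ++ P)
      = (N ++ xs.filter (fun x => decide (x < 0))) ++ (P ++ xs.filter (fun x => decide (0 ≤ x))) := by
  induction xs generalizing N P with
  | nil => simp
  | cons x xs ih =>
    by_cases hx : x < 0
    · have h1 : PySem.List.insertBy
          (fun a b => decide ((decide (0 ≤ a) : Bool) < (decide (0 ≤ b) : Bool))) x (N ++ P)
          = N ++ x :: P := by
        apply insertBy_false (fun z => (decide (0 ≤ z) : Bool))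
        · intro y hy
          have := hN y hy
          simp only [decide_eq_decide]
          omega
        · intro y hy
          have := hP y hy
          simp [decide_eq_true this, decide_eq_false (by omega : ¬ (0:Int) ≤ x)]
      have hN' : ∀ y ∈ N ++ [x], y < 0 := by
        intro y hy
        rcases List.mem_append.mp hy with h | h
        · exact hN y h
        · simp at h; omega
      have h3 := ih (N ++ [x]) P hN' hP
      simp only [List.foldl_cons, h1]
      have h2 : N ++ x :: P = (N ++ [x]) ++ P := by simp
      rw [h2, h3]
      simp [hx, decide_eq_false (by omega : ¬ (0:Int) ≤ x)]
    · have hx0 : (0:Int) ≤ x := by omega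
      have h1 : PySem.List.insertBy
          (fun a b => decide ((decide (0 ≤ a) : Bool) < (decide (0 ≤ b) : Bool))) x (N ++ P)
          = (N ++ P) ++ [x] := by
        apply insertBy_true (fun z => (decide (0 ≤ z) : Bool))
        intro y hy
        simp [decide_eq_true hx0]
      have hP' : ∀ y ∈ P ++ [x], 0 ≤ y := by
        intro y hy
        rcases List.mem_append.mp hy with h | h
        · exact hP y h
        · simp at h; omega
      have h3 := ih N (P ++ [x]) hN hP'
      simp only [List.foldl_cons, h1]
      have h2 : (N ++ P) ++ [x] = N ++ (P ++ [x]) := by simp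
      rw [h2, h3]
      simp [hx, decide_eq_true hx0]

-- A's fold builds exactly the two filters.
lemma foldA_eq_filters (xs : List Int) (N P : List Int) :
    xs.foldl (fun (st : List Int × List Int) x =>
        if x < 0 then (st.1 ++ [x], st.2) else (st.1, st.2 ++ [x])) (N, P)
      = (N ++ xs.filter (fun x => decide (x < 0)), P ++ xs.filter (fun x => decide (0 ≤ x))) := by
  induction xs generalizing N P with
  | nil => simp
  | cons x xs ih =>
    by_cases hx : x < 0
    · simp [List.foldl_cons, hx, ih,
        decide_eq_false (by omega : ¬ (0:Int) ≤ x)]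
    · simp [List.foldl_cons, hx, ih,
        decide_eq_true (by omega : (0:Int) ≤ x)]

-- ===== VERDICT (by name: the statement is the Claim_ definition above) =====
theorem exercise_13_spec : Claim_equal_exercise_13 := by
  intro xs _
  show exercise_13 xs = exercise_13_alt xs
  unfold exercise_13 exercise_13_alt PySem.List.sorted
  simp only [if_neg (by decide : ¬ (false = true))]
  rw [foldA_eq_filters xs [] []]
  have := foldl_insertBy_partition xs [] [] (by simp) (by simp)
  simp only [List.nil_append] at this ⊢
  rw [this]
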